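-- pv_equiv track=rewrite | github.com/Titanium-Birch/SFTPWrangler | src/utils/file_transformer.py | transform
-- ===== SOURCE A (Python) =====
-- def transform(csv_content: str) -> str:
--     """This transformer removes newlines from fields in a CSV file, replacing them with a
--     pipe delimiter.
--
--     This helps make CSV files usable in Athena, which expects newlines to
--     only indicate a new row in a CSV file, not a new line in a field.
--
--     Our algorithm identifies fields enclosed in double quotes and replaces any newlines
--     found within these quoted fields.
--
--     Assumptions/Requirements:
--     1. The input CSV must correctly escape fields that contain special characters like commas or newlines using
--        double quotes. For example, a field containing a newline should be enclosed in double quotes.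
--     2. Fields that contain double quotes themselves must escape these quotes with another double quote.
--
--     Args:
--         csv_content (str): string csv content to be transformed
--
--     Returns:
--         str: transformed content
--     """
--     # Replace newlines inside quoted strings
--     in_quotes = False
--     current_field = []
--
--     for char in csv_content:
--         if char == '"':
--             in_quotes = not in_quotes
--         if char == "\n" and in_quotes:
--             current_field.append(" | ")  # Replaces newline inside quotes with pipe delimiter
--         else:
--             current_field.append(char)
--
--     # Join all characters back into the cleaned full content
--     return "".join(current_field)
-- ===== SOURCE B (Python) =====
-- def transform(csv_content: str) -> str:
--     """Same transformation via split-on-quote decomposition: segments at odd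
--     indices of csv_content.split('"') are inside quotes; replace their newlines."""
--     parts = csv_content.split('"')
--     return '"'.join(
--         p.replace("\n", " | ") if i % 2 == 1 else p
--         for i, p in enumerate(parts)
--     )
-- ===== Notes on version B (the rewrite author's own statement) =====
-- stated objective: simpler
-- what changed: Replaces the character-by-character scan with a toggling boolean by splitting on '"' and doing a whole-string replace of newlines in the odd-indexed (inside-quotes) segments, then rejoining.
import Mathlib
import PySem

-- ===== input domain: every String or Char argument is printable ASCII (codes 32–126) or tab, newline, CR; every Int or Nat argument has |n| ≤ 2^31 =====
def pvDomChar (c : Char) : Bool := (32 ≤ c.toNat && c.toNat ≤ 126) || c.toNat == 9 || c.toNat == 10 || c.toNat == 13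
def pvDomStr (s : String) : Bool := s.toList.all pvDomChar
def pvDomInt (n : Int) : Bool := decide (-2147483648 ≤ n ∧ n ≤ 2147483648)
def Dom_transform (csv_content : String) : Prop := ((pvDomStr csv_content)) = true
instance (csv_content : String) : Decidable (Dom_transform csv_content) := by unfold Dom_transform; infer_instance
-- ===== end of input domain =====

-- B replaces A's character scan with a toggling boolean by splitting on '"',
-- replacing newlines in the odd-indexed (inside-quotes) segments, and rejoining (objective: simpler).


-- ===== PORT A =====
-- loop body of A: toggle in_quotes on '"'; append " | " for a newline inside quotes, else the char
def transformStep (st : Bool × List (List Char)) (ch : Char) : Bool × List (List Char) :=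
  let in_quotes := if ch == '"' then !st.1 else st.1
  if ch == '\n' && in_quotes then (in_quotes, st.2 ++ [[' ', '|', ' ']])
  else (in_quotes, st.2 ++ [[ch]])

-- for char in csv_content: (transformStep); return "".join(current_field)
def transform (csv_content : String) : String :=
  let r := csv_content.toList.foldl transformStep (false, [])
  String.mk (PySem.Chars.join [] r.2)

-- ===== PORT B =====
-- parts = csv_content.split('"'); replace '\n' by ' | ' in odd-indexed parts; return '"'.join(parts)
def transform_alt (csv_content : String) : String :=
  let parts := PySem.Chars.splitOn csv_content.toList ['"']
  String.mk (PySem.Chars.join ['"']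
    ((PySem.List.enumerate parts).map (fun ip =>
      if PySem.Int.mod ip.1 2 == 1 then PySem.Chars.replace ip.2 ['\n'] [' ', '|', ' ']
      else ip.2)))

-- ===== PRECONDITION & SPEC =====
def Spec_transform (csv_content : String) (out : String) : Prop := out = transform_alt csv_content
instance (csv_content : String) (out : String) : Decidable (Spec_transform csv_content out) := by unfold Spec_transform; infer_instance

-- ===== CLAIM (what is proved, stated in full; the proofs are below) =====
def Claim_equal_transform : Prop := ∀ (csv_content : String), Dom_transform csv_content → Spec_transform csv_content (transform csv_content)

-- ===== LEMMAS AND PROOFS =====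

-- structural form of split('"')
def splitQ : List Char → List (List Char)
  | [] => [[]]
  | c :: cs => if c = '"' then [] :: splitQ cs else (splitQ cs).modifyHead (c :: ·)

-- structural form of replace('\n', ' | ')
def repl : List Char → List Char
  | [] => []
  | c :: cs => (if c = '\n' then [' ', '|', ' '] else [c]) ++ repl cs

-- A's scan, as a recursion parameterised by the quote state
def arec : Bool → List Char → List Char
  | _, [] => []
  | b, c :: cs =>
    let b' := if c == '"' then !b else b
    (if c == '\n' && b' then [' ', '|', ' '] else [c]) ++ arec b' cs

-- join with '"', replacing newlines in parts that are inside quotes (b = first part is inside)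
def joinAlt : Bool → List (List Char) → List Char
  | _, [] => []
  | b, [p] => if b then repl p else p
  | b, p :: q :: ps => (if b then repl p else p) ++ '"' :: joinAlt (!b) (q :: ps)

theorem join_empty_sep (L : List (List Char)) : PySem.Chars.join [] L = L.flatten := by
  induction L with
  | nil => rfl
  | cons p ps ih =>
    cases ps with
    | nil => simp [PySem.Chars.join_singleton]
    | cons q qs => simp [PySem.Chars.join_cons_cons, ih]

theorem step_eq (b : Bool) (ps : List (List Char)) (c : Char) :
    transformStep (b, ps) c
      = ((if c == '"' then !b else b),
         ps ++ [if c == '\n' && (if c == '"' then !b else b) then [' ', '|', ' '] else [c]]) := by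
  show (if (c == '\n' && (if c == '"' then !b else b)) = true
          then ((if c == '"' then !b else b), ps ++ [[' ', '|', ' ']])
          else ((if c == '"' then !b else b), ps ++ [[c]]))
       = _
  by_cases h : (c == '\n' && (if c == '"' then !b else b)) = true
  · rw [if_pos h, if_pos h]
  · rw [if_neg h, if_neg h]

theorem A_loop (cs : List Char) : ∀ (b : Bool) (ps : List (List Char)),
    ((cs.foldl transformStep (b, ps)).2).flatten = ps.flatten ++ arec b cs := by
  induction cs with
  | nil => intro b ps; simp [arec]
  | cons c cs ih =>
    intro b ps
    rw [List.foldl_cons, step_eq, ih]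
    simp [arec]

theorem splitQ_ne_nil (cs : List Char) : splitQ cs ≠ [] := by
  cases cs with
  | nil => simp [splitQ]
  | cons c cs =>
    simp only [splitQ]
    split
    · simp
    · cases h : splitQ cs with
      | nil => exact absurd h (splitQ_ne_nil cs)
      | cons p ps => simp [List.modifyHead]

theorem splitOn_go_inv : ∀ (fuel : Nat) (l cur : List Char) (acc : List (List Char)),
    l.length < fuel →
    PySem.Chars.splitOn.go ['"'] fuel l cur acc
      = acc.reverse ++ (splitQ l).modifyHead (cur.reverse ++ ·) := by
  intro fuel
  induction fuel with
  | zero => intro l cur acc h; omega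
  | succ fuel ih =>
    intro l cur acc h
    cases l with
    | nil =>
      rw [PySem.Chars.splitOn.go]
      · simp [splitQ]
      · exact Nat.succ_ne_zero fuel
    | cons c rest =>
      rw [PySem.Chars.splitOn.go]
      by_cases hq : c = '"'
      · subst hq
        have hpre : List.isPrefixOf ['"'] ('"' :: rest) = true := by
          simp [List.isPrefixOf]
        rw [if_pos hpre]
        simp only [List.length_cons, List.length_nil, List.drop_succ_cons, List.drop_zero]
        rw [ih rest [] (cur.reverse :: acc) (by simp at h ⊢; omega)]
        have h3 : splitQ ('"' :: rest) = [] :: splitQ rest := by simp [splitQ]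
        rw [h3]
        cases hsq : splitQ rest with
        | nil => exact absurd hsq (splitQ_ne_nil rest)
        | cons p ps => simp [List.modifyHead]
      · have hpre : List.isPrefixOf ['"'] (c :: rest) = false := by
          simp [List.isPrefixOf]
          intro hc; exact hq hc.symm
        rw [if_neg (by simp [hpre])]
        rw [ih rest (c :: cur) acc (by simp at h ⊢; omega)]
        have h3 : splitQ (c :: rest) = (splitQ rest).modifyHead (c :: ·) := by
          simp [splitQ, hq]
        rw [h3]
        cases hsq : splitQ rest with
        | nil => exact absurd hsq (splitQ_ne_nil rest)
        | cons p ps => simp [List.modifyHead]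

theorem splitOn_eq_splitQ (cs : List Char) :
    PySem.Chars.splitOn cs ['"'] = splitQ cs := by
  unfold PySem.Chars.splitOn
  rw [splitOn_go_inv (cs.length + 1) cs [] [] (by omega)]
  cases h : splitQ cs with
  | nil => exact absurd h (splitQ_ne_nil cs)
  | cons p ps => simp

theorem replace_go_inv : ∀ (fuel : Nat) (l acc : List Char),
    l.length ≤ fuel →
    PySem.Chars.replace.go ['\n'] [' ', '|', ' '] fuel l acc = acc.reverse ++ repl l := by
  intro fuel
  induction fuel with
  | zero =>
    intro l acc h
    have hl : l = [] := List.length_eq_zero_iff.mp (Nat.le_zero.mp h)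
    subst hl
    rw [PySem.Chars.replace.go]
    simp [repl]
  | succ fuel ih =>
    intro l acc h
    cases l with
    | nil =>
      rw [PySem.Chars.replace.go]
      · simp [repl]
      · exact Nat.succ_ne_zero fuel
    | cons c rest =>
      rw [PySem.Chars.replace.go]
      by_cases hn : c = '\n'
      · subst hn
        have hpre : List.isPrefixOf ['\n'] ('\n' :: rest) = true := by
          simp [List.isPrefixOf]
        rw [if_pos hpre]
        simp only [List.length_cons, List.length_nil, List.drop_succ_cons, List.drop_zero]
        rw [ih rest _ (by simp at h ⊢; omega)]
        simp [repl]
      · have hpre : List.isPrefixOf ['\n'] (c :: rest) = false := by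
          simp [List.isPrefixOf]
          intro hc; exact hn hc.symm
        rw [if_neg (by simp [hpre])]
        rw [ih rest _ (by simp at h ⊢; omega)]
        simp [repl, hn]

theorem replace_eq_repl (cs : List Char) :
    PySem.Chars.replace cs ['\n'] [' ', '|', ' '] = repl cs := by
  unfold PySem.Chars.replace
  simp only [List.isEmpty_cons, Bool.false_eq_true, if_false]
  exact replace_go_inv cs.length cs [] (le_refl _)

theorem arec_eq_joinAlt (cs : List Char) : ∀ (b : Bool),
    arec b cs = joinAlt b (splitQ cs) := by
  induction cs with
  | nil => intro b; cases b <;> simp [arec, splitQ, joinAlt, repl]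
  | cons c cs ih =>
    intro b
    by_cases hq : c = '"'
    · subst hq
      have h2 : arec b ('"' :: cs) = '"' :: arec (!b) cs := by simp [arec]
      have h3 : splitQ ('"' :: cs) = [] :: splitQ cs := by simp [splitQ]
      rw [h2, h3, ih (!b)]
      cases hsq : splitQ cs with
      | nil => exact absurd hsq (splitQ_ne_nil cs)
      | cons p ps => cases b <;> simp [joinAlt, repl]
    · have h1 : (c == '"') = false := by simp [hq]
      have h2 : arec b (c :: cs)
          = (if c == '\n' && b then [' ', '|', ' '] else [c]) ++ arec b cs := by
        simp [arec, h1]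
      have h3 : splitQ (c :: cs) = (splitQ cs).modifyHead (c :: ·) := by
        simp [splitQ, hq]
      rw [h2, h3, ih b]
      cases hsq : splitQ cs with
      | nil => exact absurd hsq (splitQ_ne_nil cs)
      | cons p ps =>
        have hpart : (if b then repl (c :: p) else (c :: p))
            = (if c == '\n' && b then [' ', '|', ' '] else [c]) ++ (if b then repl p else p) := by
          cases b with
          | false => simp
          | true =>
            by_cases hn : c = '\n'
            · subst hn; simp [repl]
            · have h4 : (c == '\n') = false := by simp [hn]
              simp [repl, hn, h4]
        cases ps with
        | nil => simp only [List.modifyHead, joinAlt, hpart]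
        | cons q qs =>
          simp only [List.modifyHead, joinAlt, hpart, List.append_assoc]

theorem mod_two_decide (s : Nat) :
    (PySem.Int.mod (s : Int) 2 == 1) = decide (s % 2 = 1) := by
  rw [show ((2 : Int)) = ((2 : Nat) : Int) by norm_num, PySem.Int.mod_natCast]
  by_cases h : s % 2 = 1
  · simp [h]
  · have h0 : s % 2 = 0 := by omega
    simp [h0]

theorem enum_join (L : List (List Char)) : L ≠ [] → ∀ (s : Nat),
    PySem.Chars.join ['"']
      ((PySem.List.enumerate L (s : Int)).map (fun ip =>
        if PySem.Int.mod ip.1 2 == 1 then PySem.Chars.replace ip.2 ['\n'] [' ', '|', ' ']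
        else ip.2))
      = joinAlt (decide (s % 2 = 1)) L := by
  induction L with
  | nil => intro h; exact absurd rfl h
  | cons p ps ih =>
    intro _ s
    cases ps with
    | nil =>
      simp only [PySem.List.enumerate_cons, PySem.List.enumerate_nil, List.map_cons, List.map_nil,
        PySem.Chars.join_singleton, mod_two_decide, replace_eq_repl]
      cases hb : decide (s % 2 = 1) <;> simp [joinAlt]
    | cons q qs =>
      have hcast : (s : Int) + 1 = ((s + 1 : Nat) : Int) := by push_cast; ring
      have hne : (q :: qs) ≠ ([] : List (List Char)) := by simp
      have hih := ih hne (s + 1)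
      simp only [PySem.List.enumerate_cons, List.map_cons, mod_two_decide, replace_eq_repl] at hih ⊢
      rw [PySem.Chars.join_cons_cons, hcast, mod_two_decide (s + 1), hih]
      have hflip : decide ((s + 1) % 2 = 1) = !decide (s % 2 = 1) := by
        by_cases h : s % 2 = 1
        · have h2 : (s + 1) % 2 = 0 := by omega
          simp [h, h2]
        · have h0 : s % 2 = 0 := by omega
          have h2 : (s + 1) % 2 = 1 := by omega
          simp [h, h2]
      rw [hflip]
      cases hb : decide (s % 2 = 1) <;> simp [joinAlt]

-- ===== VERDICT (by name: the statement is the Claim_ definition above) =====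
theorem transform_spec : Claim_equal_transform := by
  intro csv _
  unfold Spec_transform transform transform_alt
  simp only [join_empty_sep, A_loop csv.toList false [], List.flatten_nil, List.nil_append,
    splitOn_eq_splitQ]
  rw [show ((0 : Int)) = ((0 : Nat) : Int) by norm_num,
    enum_join (splitQ csv.toList) (splitQ_ne_nil csv.toList) 0]
  rw [arec_eq_joinAlt]
  rfl
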